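-- pv_equiv track=rewrite | github.com/vaibhavTekk/aoc | 2023/day9/9b.py | get_intials
-- ===== SOURCE A (Python) =====
-- def allZeros(vals):
--     for i in vals:
--         if i != 0:
--             return False
--     return True
--
-- def get_intials(vals):
--     initials = [vals[0]]
--     currentVals = vals
--     while not allZeros(currentVals):
--         newVals = []
--         for i in range(1,len(currentVals)):
--             newVals += [currentVals[i] - currentVals[i-1]]
--         currentVals = newVals
--         initials.append(newVals[0])
--     return initials
-- ===== SOURCE B (Python) =====
-- def allZeros(vals):
--     for i in vals:
--         if i != 0:
--             return False
--     return True
--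
-- def get_intials(vals):
--     if allZeros(vals):
--         return [vals[0]]
--     diffs = [vals[i] - vals[i - 1] for i in range(1, len(vals))]
--     return [vals[0]] + get_intials(diffs)
-- ===== Notes on version B (the rewrite author's own statement) =====
-- stated objective: simpler
-- what changed: Replaced the explicit while-loop with mutable accumulator/append by direct structural recursion on the difference sequence: cons the first element onto the recursive result for the diffs.
import Mathlib
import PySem

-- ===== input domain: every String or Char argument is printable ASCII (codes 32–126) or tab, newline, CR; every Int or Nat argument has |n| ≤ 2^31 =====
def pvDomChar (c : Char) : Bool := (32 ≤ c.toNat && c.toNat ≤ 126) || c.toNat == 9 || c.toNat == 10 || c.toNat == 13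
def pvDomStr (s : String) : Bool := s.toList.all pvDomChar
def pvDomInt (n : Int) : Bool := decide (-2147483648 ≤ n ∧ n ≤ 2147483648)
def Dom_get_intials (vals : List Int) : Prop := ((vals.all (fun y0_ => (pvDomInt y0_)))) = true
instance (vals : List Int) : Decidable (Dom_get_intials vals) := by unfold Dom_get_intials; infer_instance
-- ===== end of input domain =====

-- B replaces A's while-loop with mutable append by structural recursion on the difference sequence (objective: simpler).


-- ===== PORT A =====
-- allZeros: shared helper, defined identically in both Python sources
def allZeros : List Int → Bool
  | [] => true
  | i :: t => if i ≠ 0 then false else allZeros t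

-- A's inner for-loop: newVals built by repeated 'newVals += [cv[i] - cv[i-1]]' over range(1, len(cv))
def stepA (cv : List Int) : List Int :=
  (PySem.List.pyRange 1 (cv.length : Int) 1).foldl
    (fun acc i => acc ++ [PySem.List.pyGetD cv i 0 - PySem.List.pyGetD cv (i - 1) 0]) []

-- termination fact for loopA (cited by name in decreasing_by)
theorem stepA_length_lt (cv : List Int) (h : cv ≠ []) : (stepA cv).length < cv.length := by
  rw [stepA, PySem.List.foldl_append_singleton_eq_map, List.nil_append,
    List.length_map, PySem.List.length_pyRange_one]
  have : 1 ≤ cv.length := List.length_pos_iff.mpr h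
  omega

theorem allZeros_false_ne_nil (cv : List Int) (h : allZeros cv = false) : cv ≠ [] := by
  intro hnil; subst hnil; simp [allZeros] at h

-- A's while-loop
def loopA (cv : List Int) (initials : List Int) : List Int :=
  if h : allZeros cv then initials
  else
    match (stepA cv).head? with
    | none => []          -- Python: newVals[0] raises IndexError here; excluded by Pre_
    | some h0 => loopA (stepA cv) (initials ++ [h0])
termination_by cv.length
decreasing_by exact stepA_length_lt cv (allZeros_false_ne_nil cv (Bool.not_eq_true _ ▸ (by simpa using h)))

def get_intials (vals : List Int) : List Int :=
  match vals.head? with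
  | none => []              -- Python: vals[0] raises IndexError on []; excluded by Pre_
  | some h0 => loopA vals [h0]

-- ===== PORT B =====
-- B's list comprehension [vals[i] - vals[i-1] for i in range(1, len(vals))]
def diffsB (vals : List Int) : List Int :=
  (PySem.List.pyRange 1 (vals.length : Int) 1).map
    (fun i => PySem.List.pyGetD vals i 0 - PySem.List.pyGetD vals (i - 1) 0)

theorem diffsB_length_lt (vals : List Int) (h : vals ≠ []) : (diffsB vals).length < vals.length := by
  rw [diffsB, List.length_map, PySem.List.length_pyRange_one]
  have : 1 ≤ vals.length := List.length_pos_iff.mpr h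
  omega

def get_intials_alt (vals : List Int) : List Int :=
  if h : allZeros vals then
    match vals.head? with
    | none => []            -- Python: vals[0] raises IndexError on []; excluded by Pre_
    | some h0 => [h0]
  else
    match vals.head? with
    | none => []            -- unreachable: vals ≠ [] in this branch
    | some h0 => h0 :: get_intials_alt (diffsB vals)
termination_by vals.length
decreasing_by exact diffsB_length_lt vals (allZeros_false_ne_nil vals (Bool.not_eq_true _ ▸ (by simpa using h)))

-- ===== PRECONDITION & SPEC =====
-- the mathematical successive-difference operator (independent of either port)
def pvDiff (l : List Int) : List Int := List.zipWith (fun a b => a - b) l.tail l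

-- Pre_ excludes exactly the inputs on which Python A raises IndexError: the empty list, and lists whose
-- difference pyramid never reaches an all-zero level (equivalently, whose (n-1)-st difference sequence is nonzero).
def Pre_get_intials (vals : List Int) : Prop := pvDiff^[vals.length - 1] vals = [0]
instance (vals : List Int) : Decidable (Pre_get_intials vals) := by unfold Pre_get_intials; infer_instance
def pvWitness_get_intials : List Int := [1, 3, 6, 10]

def Spec_get_intials (vals : List Int) (out : List Int) : Prop := out = get_intials_alt vals
instance (vals : List Int) (out : List Int) : Decidable (Spec_get_intials vals out) := by unfold Spec_get_intials; infer_instance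

-- ===== CLAIM (what is proved, stated in full; the proofs are below) =====
def Claim_equal_get_intials : Prop := ∀ (vals : List Int), Dom_get_intials vals → Pre_get_intials vals → Spec_get_intials vals (get_intials vals)

-- ===== LEMMAS AND PROOFS =====
theorem stepA_eq_diffsB (cv : List Int) : stepA cv = diffsB cv := by
  rw [stepA, diffsB, PySem.List.foldl_append_singleton_eq_map, List.nil_append]

theorem diffsB_eq_pvDiff (vals : List Int) : diffsB vals = pvDiff vals := by
  apply List.ext_getElem
  · rw [diffsB, List.length_map, PySem.List.length_pyRange_one, pvDiff, List.length_zipWith,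
      List.length_tail]
    omega
  · intro k h1 h2
    have hk : k < vals.length - 1 := by
      simpa [pvDiff, List.length_zipWith, List.length_tail] using h2
    simp only [diffsB] at h1 ⊢
    rw [List.getElem_map, PySem.List.getElem_pyRange_one 1 (vals.length : Int) k
      (by simpa [diffsB] using h1)]
    rw [PySem.List.pyGetD_eq_getElem vals 0 (by omega) (by omega),
      PySem.List.pyGetD_eq_getElem vals 0 (by omega) (by omega)]
    have e1 : ((1 : Int) + (k : Int)).toNat = k + 1 := by omega
    have e2 : ((1 : Int) + (k : Int) - 1).toNat = k := by omega
    simp only [e1, e2, pvDiff, List.getElem_zipWith, List.getElem_tail]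

theorem alt_head (l : List Int) (h0 : Int) (h : l.head? = some h0) :
    (get_intials_alt l).head? = some h0 := by
  rw [get_intials_alt]
  split <;> simp [h]

theorem loopA_eq (n : ℕ) : ∀ (cv init : List Int), cv.length ≤ n →
    pvDiff^[cv.length - 1] cv = [0] →
    loopA cv init = init ++ (get_intials_alt cv).tail := by
  induction n with
  | zero =>
    intro cv init hle hpre
    have : cv = [] := List.length_eq_zero_iff.mp (by omega)
    subst this
    simp at hpre
  | succ n ih =>
    intro cv init hle hpre
    cases hz : allZeros cv with
    | true =>
      rw [loopA, get_intials_alt]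
      simp only [hz]
      cases cv <;> simp
    | false =>
      have hne := allZeros_false_ne_nil cv hz
      have hlen1 : 1 ≤ cv.length := List.length_pos_iff.mpr hne
      have hlen2 : 2 ≤ cv.length := by
        by_contra hcon
        have h1 : cv.length = 1 := by omega
        rw [h1] at hpre
        simp only [Nat.sub_self, Function.iterate_zero, id_eq] at hpre
        rw [hpre] at hz
        simp [allZeros] at hz
      have hstep : stepA cv = pvDiff cv := (stepA_eq_diffsB cv).trans (diffsB_eq_pvDiff cv)
      have hslen : (stepA cv).length = cv.length - 1 := by
        rw [hstep, pvDiff, List.length_zipWith, List.length_tail]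
        omega
      obtain ⟨h', t', hcons⟩ : ∃ h' t', stepA cv = h' :: t' := by
        cases hs : stepA cv with
        | nil => rw [hs] at hslen; simp at hslen; omega
        | cons a b => exact ⟨a, b, rfl⟩
      have hpre' : pvDiff^[(stepA cv).length - 1] (stepA cv) = [0] := by
        have e : cv.length - 1 = (cv.length - 2) + 1 := by omega
        rw [e, Function.iterate_succ_apply] at hpre
        rw [hslen, hstep]
        have e2 : cv.length - 1 - 1 = cv.length - 2 := by omega
        rw [e2]
        exact hpre
      have hIH := ih (stepA cv) (init ++ [h']) (by omega) hpre'
      rw [loopA]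
      simp only [hz, Bool.false_eq_true, ↓reduceDIte, hcons, List.head?_cons]
      rw [← hcons, hIH]
      conv_rhs => rw [get_intials_alt]
      obtain ⟨c, rest, rfl⟩ := List.exists_cons_of_ne_nil hne
      simp only [hz, Bool.false_eq_true, ↓reduceDIte, List.head?_cons, List.tail_cons]
      have halt_head := alt_head (stepA (c :: rest)) h' (by rw [hcons]; rfl)
      have hdB : diffsB (c :: rest) = stepA (c :: rest) := (stepA_eq_diffsB _).symm
      rw [hdB]
      rcases he : get_intials_alt (stepA (c :: rest)) with _ | ⟨a, r⟩
      · rw [he] at halt_head; simp at halt_head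
      · rw [he] at halt_head
        simp only [List.head?_cons, Option.some.injEq] at halt_head
        subst halt_head
        simp

theorem pre_ne_nil (vals : List Int) (h : Pre_get_intials vals) : vals ≠ [] := by
  intro hnil; subst hnil; simp [Pre_get_intials] at h

-- ===== VERDICT (by name: the statement is the Claim_ definition above) =====
theorem get_intials_spec : Claim_equal_get_intials := by
  intro vals _ hpre
  unfold Spec_get_intials
  have hne := pre_ne_nil vals hpre
  obtain ⟨h0, t, rfl⟩ := List.exists_cons_of_ne_nil hne
  rw [get_intials]
  simp only [List.head?_cons]
  rw [loopA_eq (h0 :: t).length (h0 :: t) [h0] le_rfl hpre]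
  have := alt_head (h0 :: t) h0 (by simp)
  rcases halt : get_intials_alt (h0 :: t) with _ | ⟨a, r⟩
  · simp [halt] at this
  · rw [halt] at this; simp at this; simp [this]
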